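-- pv_equiv track=rewrite | github.com/AreebaAbid0067/AdventOfCode_2025 | day2_p2.py | is_repeated_pattern
-- ===== SOURCE A (Python) =====
-- def is_repeated_pattern(num_str):
--     """Return True if num_str is some substring repeated 2+ times"""
--     n = len(num_str)
--     # Try every possible pattern length that divides the full length
--     for pat_len in range(1, n // 2 + 1):
--         if n % pat_len == 0:
--             pattern = num_str[:pat_len]
--             if pattern * (n // pat_len) == num_str:
--                 return True
--     return False
-- ===== SOURCE B (Python) =====
-- def is_repeated_pattern(num_str):
--     """Return True if num_str is some substring repeated 2+ times"""
--     return len(num_str) > 0 and (num_str + num_str).find(num_str, 1) < len(num_str)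
-- ===== Notes on version B (the rewrite author's own statement) =====
-- stated objective: faster
-- what changed: Replaced the trial loop over all divisor pattern lengths (each verified by building and comparing a repeated copy) with the single string-doubling check (s+s).find(s,1) < len(s).
import Mathlib
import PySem

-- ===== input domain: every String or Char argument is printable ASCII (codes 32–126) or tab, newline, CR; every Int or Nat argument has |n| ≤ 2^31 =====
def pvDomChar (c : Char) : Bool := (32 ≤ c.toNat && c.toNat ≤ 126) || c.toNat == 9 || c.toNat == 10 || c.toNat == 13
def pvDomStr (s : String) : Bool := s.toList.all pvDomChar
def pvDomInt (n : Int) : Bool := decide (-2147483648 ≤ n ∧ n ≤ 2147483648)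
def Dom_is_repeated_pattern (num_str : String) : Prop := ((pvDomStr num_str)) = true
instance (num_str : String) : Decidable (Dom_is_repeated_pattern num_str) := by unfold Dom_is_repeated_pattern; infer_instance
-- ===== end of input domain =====

-- B replaces A's divisor loop by the single doubling-trick check (s+s).find(s,1) < len(s); return-value equivalence.

-- ===== PORT A =====
def is_repeated_pattern (num_str : String) : Bool :=
  let s := num_str.toList
  let n : Int := s.length
  (PySem.List.pyRange 1 (PySem.Int.floordiv n 2 + 1)).any fun pat_len =>
    if PySem.Int.mod n pat_len == 0 then
      (PySem.List.pyRepeat (PySem.Chars.slice s none (some pat_len)) (PySem.Int.floordiv n pat_len)) == s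
    else false

-- ===== PORT B =====
def is_repeated_pattern_alt (num_str : String) : Bool :=
  let s := num_str.toList
  let n : Int := s.length
  decide (0 < n) && decide (PySem.Chars.findFrom (s ++ s) s 1 < n)

-- ===== PRECONDITION & SPEC =====
def Spec_is_repeated_pattern (num_str : String) (out : Bool) : Prop := out = is_repeated_pattern_alt num_str
instance (num_str : String) (out : Bool) : Decidable (Spec_is_repeated_pattern num_str out) := by unfold Spec_is_repeated_pattern; infer_instance

-- ===== CLAIM (what is proved, stated in full; the proofs are below) =====
def Claim_equal_is_repeated_pattern : Prop := ∀ (num_str : String), Dom_is_repeated_pattern num_str → Spec_is_repeated_pattern num_str (is_repeated_pattern num_str)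

-- ===== LEMMAS AND PROOFS =====
theorem rot_pow {l : List Char} {k : ℕ} (h : l.rotate k = l) : ∀ m, l.rotate (k*m) = l := by
  intro m
  induction m with
  | zero => simp
  | succ m ih =>
      have : l.rotate (k*m + k) = l := by
        rw [← List.rotate_rotate, ih, h]
      simpa [Nat.mul_succ] using this

theorem rot_gcd {l : List Char} {k : ℕ} (h1 : 1 ≤ k) (h2 : k < l.length)
    (h : l.rotate k = l) : l.rotate (Nat.gcd k l.length) = l := by
  have hlt : Nat.gcd k l.length < l.length := lt_of_le_of_lt (Nat.gcd_le_left _ h1) h2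
  obtain ⟨m, _, hm⟩ := Nat.exists_mul_mod_eq_gcd hlt
  rw [← hm, List.rotate_mod, rot_pow h]

theorem rot_occ {l : List Char} {k : ℕ} (h1 : 1 ≤ k) (h2 : k ≤ l.length) :
    (l <+: (l ++ l).drop k ↔ l.rotate k = l) := by
  have hd : (l ++ l).drop k = l.drop k ++ l := by
    rw [List.drop_append, Nat.sub_eq_zero_of_le h2, List.drop_zero]
  rw [hd, List.prefix_iff_eq_take, List.take_append, List.rotate_eq_drop_append_take h2]
  have hlen : (l.drop k).length = l.length - k := by simp
  have hk : l.length - (l.length - k) = k := by omega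
  rw [List.take_of_length_le (by omega), hlen, hk]
  exact comm

theorem drop_eq_take_of_rot {l : List Char} {d : ℕ} (hdn : d ≤ l.length)
    (h : l.rotate d = l) : l.drop d = l.take (l.length - d) := by
  have hsplit : l.drop d ++ l.take d = l := by
    rw [← List.rotate_eq_drop_append_take hdn, h]
  have : (l.drop d ++ l.take d).take (l.length - d) = l.take (l.length - d) := by rw [hsplit]
  rw [List.take_append, List.length_drop, Nat.sub_self, List.take_zero, List.append_nil,
      List.take_of_length_le (by simp)] at this
  exact this

theorem take_period {l : List Char} {d : ℕ} (h : l.rotate d = l) :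
    ∀ m, m*d + d ≤ l.length → (l.drop (m*d)).take d = l.take d := by
  intro m
  induction m with
  | zero => intro _; simp
  | succ m ih =>
      intro hm
      have hdn : d ≤ l.length := by omega
      have h1 : (m+1)*d = d + m*d := by ring
      rw [h1, ← List.drop_drop, drop_eq_take_of_rot hdn h, List.drop_take, List.take_take,
          Nat.min_eq_left (by omega)]
      exact ih (by omega)

theorem rep_of_rot {l : List Char} {d : ℕ} (hdvd : d ∣ l.length)
    (h : l.rotate d = l) : (List.replicate (l.length/d) (l.take d)).flatten = l := by
  rcases Nat.eq_zero_or_pos d with rfl | hd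
  · simp_all
  have key : ∀ m, m*d ≤ l.length → (List.replicate m (l.take d)).flatten = l.take (m*d) := by
    intro m
    induction m with
    | zero => intro _; simp
    | succ m ih =>
        intro hm
        have h1 : List.replicate (m+1) (l.take d) = List.replicate m (l.take d) ++ [l.take d] := by
          rw [← List.replicate_succ']
        have h2 : (m+1)*d = m*d + d := by ring
        rw [h1, List.flatten_append, List.flatten_singleton, ih (by omega),
            ← take_period h m (by omega), h2, List.take_add]
  have hmul : (l.length / d) * d = l.length := Nat.div_mul_cancel hdvd
  rw [key _ (by omega), hmul, List.take_length]

theorem rot_of_rep {l : List Char} {d : ℕ} (hd : 0 < d) (hdn : d ≤ l.length)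
    (hrep : (List.replicate (l.length/d) (l.take d)).flatten = l) : l.rotate d = l := by
  have hm : 1 ≤ l.length / d := Nat.one_le_div_iff hd |>.mpr hdn
  obtain ⟨q, hq⟩ : ∃ q, l.length / d = q + 1 := ⟨_, (Nat.succ_pred_eq_of_pos hm).symm⟩
  rw [hq] at hrep
  have hsplit : l = l.take d ++ (List.replicate q (l.take d)).flatten := by
    conv_lhs => rw [← hrep]
    rw [List.replicate_succ, List.flatten_cons]
  have hdrop : l.drop d = (List.replicate q (l.take d)).flatten := by
    conv_lhs => rw [hsplit]
    rw [List.drop_append_of_le_length (by simp [hdn]), List.drop_of_length_le (by simp [Nat.min_eq_left hdn]), List.nil_append]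
  rw [List.rotate_eq_drop_append_take hdn, hdrop]
  conv_rhs => rw [← hrep]
  rw [List.replicate_succ', List.flatten_append, List.flatten_singleton]

def pvRep (l : List Char) : Prop := ∃ k, 1 ≤ k ∧ k < l.length ∧ l.rotate k = l

theorem A_iff (num_str : String) : is_repeated_pattern num_str = true ↔ pvRep num_str.toList := by
  set l := num_str.toList with hl
  have hfd2 : PySem.Int.floordiv (l.length : Int) 2 = ((l.length / 2 : ℕ) : Int) := by
    exact_mod_cast PySem.Int.floordiv_natCast l.length 2
  simp only [is_repeated_pattern, List.any_eq_true, ← hl]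
  constructor
  · rintro ⟨x, hx, hp⟩
    rw [PySem.List.mem_pyRange_one, hfd2] at hx
    lift x to ℕ using (by omega) with d
    have hd1 : 1 ≤ d := by exact_mod_cast hx.1
    have hd2 : d ≤ l.length / 2 := by
      have := hx.2; omega
    by_cases hmod : PySem.Int.mod (l.length : Int) (d : Int) == 0
    · rw [if_pos hmod] at hp
      have hdvd : (d : ℕ) ∣ l.length := by
        have := (PySem.Int.mod_eq_zero_iff_dvd (l.length : Int) (d : Int)).mp (by exact_mod_cast beq_iff_eq.mp hmod)
        exact_mod_cast this
      have hslice : PySem.Chars.slice l none (some (d : Int)) = l.take d := by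
        rw [PySem.Chars.slice_eq_listSlice, PySem.List.slice_to_natCast]
      have hfdd : PySem.Int.floordiv (l.length : Int) (d : Int) = ((l.length / d : ℕ) : Int) := by
        exact_mod_cast PySem.Int.floordiv_natCast l.length d
      rw [hslice, hfdd] at hp
      have hrep : (List.replicate (l.length / d) (l.take d)).flatten = l := by
        have := beq_iff_eq.mp hp
        simpa [PySem.List.pyRepeat] using this
      have hdn : d < l.length := by omega
      exact ⟨d, hd1, hdn, rot_of_rep (by omega) (by omega) hrep⟩
    · rw [if_neg hmod] at hp; exact absurd hp (by simp)
  · rintro ⟨k, hk1, hk2, hrot⟩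
    set g := Nat.gcd k l.length with hg
    have hgrot : l.rotate g = l := rot_gcd hk1 hk2 hrot
    have hgdvd : g ∣ l.length := Nat.gcd_dvd_right _ _
    have hg1 : 1 ≤ g := Nat.pos_of_ne_zero (by simp [hg]; omega)
    have hgk : g ≤ k := Nat.gcd_le_left _ (by omega)
    have hghalf : g ≤ l.length / 2 := by
      have h2 : 2 * g ≤ l.length := by
        rcases hgdvd with ⟨c, hc⟩
        have hc2 : 2 ≤ c := by nlinarith [hc, hgk, hk2]
        nlinarith
      omega
    refine ⟨(g : Int), ?_, ?_⟩
    · rw [PySem.List.mem_pyRange_one, hfd2]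
      refine ⟨?_, ?_⟩ <;> omega
    · have hmod : PySem.Int.mod (l.length : Int) (g : Int) == 0 := by
        rw [beq_iff_eq, PySem.Int.mod_eq_zero_iff_dvd]
        exact_mod_cast hgdvd
      rw [if_pos hmod]
      rw [PySem.Chars.slice_eq_listSlice, PySem.List.slice_to_natCast,
          show PySem.Int.floordiv (l.length : Int) (g : Int) = ((l.length / g : ℕ) : Int) from by exact_mod_cast PySem.Int.floordiv_natCast l.length g]
      rw [beq_iff_eq]
      simpa [PySem.List.pyRepeat] using rep_of_rot hgdvd hgrot

theorem B_iff {l : List Char} (h : 0 < l.length) :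
    (PySem.Chars.findFrom (l ++ l) l 1 < (l.length : Int)) ↔ pvRep l := by
  rw [show (1:Int) = ((1:ℕ):Int) by norm_num]
  have hlen : (1:ℕ) ≤ (l ++ l).length := by simp; omega
  have hocc1 : l <:+: (l ++ l).drop 1 := by
    have hd : (l ++ l).drop 1 = l.drop 1 ++ l := by
      rw [List.drop_append, Nat.sub_eq_zero_of_le h, List.drop_zero]
    rw [hd]
    exact (List.suffix_append _ _).isInfix
  have hne : PySem.Chars.findFrom (l ++ l) l ((1:ℕ):Int) ≠ -1 := by
    intro hc
    exact ((PySem.Chars.findFrom_natCast_eq_neg_one_iff (l ++ l) l 1 hlen).mp hc) hocc1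
  obtain ⟨hge, hpre, hmin⟩ := PySem.Chars.findFrom_natCast_spec (l ++ l) l 1 hlen hne
  set F := PySem.Chars.findFrom (l ++ l) l ((1:ℕ):Int) with hF
  have hge1 : (1:ℤ) ≤ F := by exact_mod_cast hge
  have hFnat : F = (F.toNat : ℤ) := (Int.toNat_of_nonneg (by omega)).symm
  constructor
  · intro hlt
    have hj1 : 1 ≤ F.toNat := by omega
    have hj2 : F.toNat < l.length := by omega
    exact ⟨F.toNat, hj1, hj2, (rot_occ hj1 (by omega)).mp hpre⟩
  · rintro ⟨k, hk1, hk2, hrot⟩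
    have hocc : l <+: (l ++ l).drop k := (rot_occ hk1 (by omega)).mpr hrot
    by_contra hge'
    have : k < F.toNat := by omega
    exact hmin k hk1 this hocc

theorem B_iff_full (num_str : String) : is_repeated_pattern_alt num_str = true ↔ pvRep num_str.toList := by
  simp only [is_repeated_pattern_alt, Bool.and_eq_true, decide_eq_true_eq]
  rcases Nat.eq_zero_or_pos num_str.toList.length with h0 | hpos
  · constructor
    · rintro ⟨h1, _⟩; exfalso; rw [h0] at h1; exact absurd h1 (by norm_num)
    · rintro ⟨k, hk1, hk2, _⟩; omega
  · rw [B_iff hpos]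
    exact ⟨fun h => h.2, fun h => ⟨by exact_mod_cast hpos, h⟩⟩

-- ===== VERDICT (by name: the statement is the Claim_ definition above) =====
theorem is_repeated_pattern_spec : Claim_equal_is_repeated_pattern := by
  intro num_str _
  unfold Spec_is_repeated_pattern
  rw [Bool.eq_iff_iff, A_iff, B_iff_full]
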